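-- pv_equiv track=rewrite | github.com/manwar/perlweeklychallenge-club | challenge-318/roger-bell-west/python/ch-1.py | groupposition
-- ===== SOURCE A (Python) =====
-- def groupposition(a):
--   mx = []
--   lc = "z"
--   for i, c in enumerate(a):
--     if i == 0:
--       lc = chr(ord(c) + 1)
--     if lc == c:
--       mc = len(mx)
--       mx[mc - 1][1] += 1
--     else:
--       mx.append([c, 1])
--       lc = c
--   out = []
--   for ms in mx:
--     if ms[1] >= 3:
--       out.append(ms[0] * ms[1])
--   return out
-- ===== SOURCE B (Python) =====
-- def groupposition(a):
--   out = []
--   i = 0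
--   n = len(a)
--   while i < n:
--     j = i
--     while j < n and a[j] == a[i]:
--       j += 1
--     if j - i >= 3:
--       out.append(a[i] * (j - i))
--     i = j
--   return out
-- ===== Notes on version B (the rewrite author's own statement) =====
-- stated objective: simpler
-- what changed: Replaces the two-pass design (build a run-length list with a tracked last-char sentinel, then filter it) by a single index-based scan that measures each run with an inner while and appends qualifying runs directly, with no intermediate list.
import Mathlib
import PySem

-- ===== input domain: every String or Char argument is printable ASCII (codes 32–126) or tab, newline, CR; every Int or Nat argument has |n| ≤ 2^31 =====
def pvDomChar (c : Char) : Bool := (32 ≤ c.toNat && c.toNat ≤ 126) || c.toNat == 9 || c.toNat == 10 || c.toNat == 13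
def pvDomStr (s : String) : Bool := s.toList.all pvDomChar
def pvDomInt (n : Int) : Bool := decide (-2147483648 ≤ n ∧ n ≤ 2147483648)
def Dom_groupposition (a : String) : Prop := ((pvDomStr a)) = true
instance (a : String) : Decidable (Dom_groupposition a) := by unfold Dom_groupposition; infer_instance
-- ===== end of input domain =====

-- B replaces A's two passes (run-length list built with a last-char sentinel, then a filter pass)
-- by a single index scan that appends qualifying runs directly; equivalence proved on Dom.

-- ===== PORT A =====
-- mx[mc - 1][1] += 1 with mc = len(mx): increment the count of the LAST entry
-- (Python's mx[-1] would raise on an empty mx; A only executes this with mx nonempty,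
-- and on [] this helper is never reached by the port either).
def pvBumpLast : List (Char × Int) → List (Char × Int)
  | [] => []
  | [(c, n)] => [(c, n + 1)]
  | x :: xs => x :: pvBumpLast xs

-- one iteration of A's first loop; chr(ord(c)+1) is Char.ofNat (c.toNat+1), exact on Dom (ASCII)
def pvStepA (st : List (Char × Int) × Char) (ic : Int × Char) : List (Char × Int) × Char :=
  let lc := if ic.1 = 0 then Char.ofNat (ic.2.toNat + 1) else st.2
  if lc = ic.2 then (pvBumpLast st.1, lc) else (st.1 ++ [(ic.2, 1)], ic.2)

def groupposition (a : String) : List String :=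
  -- second loop: ms[0] * ms[1] (count ≥ 3 in the branch, so .toNat is exact)
  ((PySem.List.enumerate a.toList).foldl pvStepA ([], 'z')).1.foldl (fun out ms => if 3 ≤ ms.2 then out ++ [String.ofList (List.replicate ms.2.toNat ms.1)] else out) []

-- ===== PORT B =====
-- inner 'while j < n and a[j] == a[i]': length of the leading run of c in the remaining suffix
def pvLeadRun (c : Char) : List Char → Nat
  | [] => 0
  | d :: ds => if d = c then pvLeadRun c ds + 1 else 0

-- outer while loop: i jumps to j = end of the current run
def pvScanB : List Char → List String
  | [] => []
  | c :: cs =>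
    (if 3 ≤ pvLeadRun c cs + 1 then [String.ofList (List.replicate (pvLeadRun c cs + 1) c)] else [])
      ++ pvScanB (cs.drop (pvLeadRun c cs))
termination_by l => l.length
decreasing_by simp

def groupposition_alt (a : String) : List String := pvScanB a.toList

-- ===== PRECONDITION & SPEC =====
def Spec_groupposition (a : String) (out : List String) : Prop := out = groupposition_alt a
instance (a : String) (out : List String) : Decidable (Spec_groupposition a out) := by unfold Spec_groupposition; infer_instance

-- ===== CLAIM (what is proved, stated in full; the proofs are below) =====
def Claim_equal_groupposition : Prop := ∀ (a : String), Dom_groupposition a → Spec_groupposition a (groupposition a)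

-- ===== LEMMAS AND PROOFS =====

-- the second loop of A, as a function of the finished mx
def pvOutPass (mx : List (Char × Int)) : List String :=
  mx.foldl (fun out ms => if 3 ≤ ms.2 then out ++ [String.ofList (List.replicate ms.2.toNat ms.1)] else out) []

def pvEmit (ms : Char × Int) : List String :=
  if 3 ≤ ms.2 then [String.ofList (List.replicate ms.2.toNat ms.1)] else []

theorem pvOutPass_eq (mx : List (Char × Int)) (acc : List String) :
    mx.foldl (fun out ms => if 3 ≤ ms.2 then out ++ [String.ofList (List.replicate ms.2.toNat ms.1)] else out) acc
      = acc ++ mx.flatMap pvEmit := by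
  induction mx generalizing acc with
  | nil => simp
  | cons x xs ih => simp [List.foldl_cons, ih, pvEmit]; split <;> simp

theorem pvBumpLast_append (mx : List (Char × Int)) (c : Char) (n : Int) :
    pvBumpLast (mx ++ [(c, n)]) = mx ++ [(c, n + 1)] := by
  induction mx with
  | nil => simp [pvBumpLast]
  | cons x xs ih =>
    cases h : xs ++ [(c, n)] with
    | nil => simp at h
    | cons y ys =>
      simp only [List.cons_append, h, pvBumpLast]
      rw [← h, ih]

-- A's loop body once the index is nonzero (the 'i == 0' branch is dead)
def pvStep2 (st : List (Char × Int) × Char) (c : Char) : List (Char × Int) × Char :=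
  if st.2 = c then (pvBumpLast st.1, st.2) else (st.1 ++ [(c, 1)], c)

theorem pvFold_enum (cs : List Char) (st : List (Char × Int) × Char) (s : Int) (hs : 1 ≤ s) :
    (PySem.List.enumerate cs s).foldl pvStepA st = cs.foldl pvStep2 st := by
  induction cs generalizing st s with
  | nil => simp [PySem.List.enumerate_nil]
  | cons c cs ih =>
    rw [PySem.List.enumerate_cons, List.foldl_cons, List.foldl_cons, ih _ _ (by omega)]
    have h0 : s ≠ 0 := by omega
    simp [pvStepA, pvStep2, h0]

theorem pvScanB_cons (c : Char) (l : List Char) :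
    pvScanB (c :: l)
      = (if 3 ≤ (1 : Int) + (pvLeadRun c l : Int)
           then [String.ofList (List.replicate ((1 : Int) + (pvLeadRun c l : Int)).toNat c)] else [])
        ++ pvScanB (l.drop (pvLeadRun c l)) := by
  rw [pvScanB.eq_def]
  change (if 3 ≤ pvLeadRun c l + 1 then [String.ofList (List.replicate (pvLeadRun c l + 1) c)] else [])
      ++ pvScanB (l.drop (pvLeadRun c l)) = _
  congr 1
  by_cases h : 3 ≤ pvLeadRun c l + 1
  · rw [if_pos h, if_pos (show (3 : Int) ≤ 1 + (pvLeadRun c l : Int) by omega)]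
    rw [show ((1 : Int) + (pvLeadRun c l : Int)).toNat = pvLeadRun c l + 1 by omega]
  · rw [if_neg h, if_neg (show ¬ (3 : Int) ≤ 1 + (pvLeadRun c l : Int) by omega)]

-- main loop invariant: folding the rest of the string from a state whose last run is (c, n)
theorem pvMain (l : List Char) (mx : List (Char × Int)) (c : Char) (n : Int) (hn : 1 ≤ n) :
    pvOutPass ((l.foldl pvStep2 (mx ++ [(c, n)], c)).1)
      = pvOutPass mx
        ++ (if 3 ≤ n + (pvLeadRun c l : Int)
              then [String.ofList (List.replicate (n + (pvLeadRun c l : Int)).toNat c)] else [])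
        ++ pvScanB (l.drop (pvLeadRun c l)) := by
  induction l generalizing mx c n with
  | nil =>
    simp only [List.foldl_nil, pvLeadRun, pvOutPass, pvOutPass_eq, List.drop_nil]
    simp [pvScanB, List.flatMap_append, pvEmit]
  | cons d l ih =>
    by_cases hdc : c = d
    · subst hdc
      rw [List.foldl_cons]
      have hstep : pvStep2 (mx ++ [(c, n)], c) c = (mx ++ [(c, n + 1)], c) := by
        simp [pvStep2, pvBumpLast_append]
      rw [hstep, ih mx c (n + 1) (by omega)]
      have hlr : pvLeadRun c (c :: l) = pvLeadRun c l + 1 := by simp [pvLeadRun]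
      rw [hlr]
      have hd : (c :: l).drop (pvLeadRun c l + 1) = l.drop (pvLeadRun c l) := by simp
      rw [hd]
      have harith : n + ((pvLeadRun c l + 1 : Nat) : Int) = (n + 1) + (pvLeadRun c l : Int) := by
        push_cast; ring
      rw [harith]
    · rw [List.foldl_cons]
      have hstep : pvStep2 (mx ++ [(c, n)], c) d = ((mx ++ [(c, n)]) ++ [(d, 1)], d) := by
        simp [pvStep2, hdc]
      rw [hstep, ih (mx ++ [(c, n)]) d 1 (by omega)]
      have hdc' : ¬ d = c := fun h => hdc h.symm
      have hlr : pvLeadRun c (d :: l) = 0 := by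
        simp [pvLeadRun, hdc']
      rw [hlr]
      simp only [List.drop_zero, Nat.cast_zero, add_zero]
      rw [pvScanB_cons]
      have hmx : pvOutPass (mx ++ [(c, n)]) = pvOutPass mx ++ pvEmit (c, n) := by
        simp [pvOutPass, pvOutPass_eq, pvEmit]
        split <;> simp
      rw [hmx]
      simp only [pvEmit, List.append_assoc]

theorem pvValid (c : Char) (hc : pvDomChar c = true) : (Char.ofNat (c.toNat + 1)).toNat = c.toNat + 1 := by
  have hle : c.toNat + 1 ≤ 127 := by
    simp [pvDomChar] at hc
    omega
  have hv : Nat.isValidChar (c.toNat + 1) := Or.inl (by omega)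
  simp [Char.ofNat, hv]

-- ===== VERDICT (by name: the statement is the Claim_ definition above) =====
theorem groupposition_spec : Claim_equal_groupposition := by
  intro a hdom
  unfold Spec_groupposition groupposition groupposition_alt
  cases hl : a.toList with
  | nil => simp [PySem.List.enumerate_nil, pvScanB]
  | cons c cs =>
    have hc : pvDomChar c = true := by
      have := hdom
      unfold Dom_groupposition pvDomStr at this
      rw [hl] at this
      simp [List.all_cons] at this
      exact this.1
    rw [PySem.List.enumerate_cons, List.foldl_cons]
    have hne : Char.ofNat (c.toNat + 1) ≠ c := by
      intro h
      have := pvValid c hc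
      rw [h] at this
      omega
    have hstep : pvStepA ([], 'z') (0, c) = ([(c, 1)], c) := by
      simp [pvStepA, hne]
    rw [hstep]
    simp only [zero_add]
    rw [pvFold_enum cs _ 1 (by omega)]
    change pvOutPass ((cs.foldl pvStep2 ([(c, 1)], c)).1) = pvScanB (c :: cs)
    have hm := pvMain cs [] c 1 (by omega)
    simp only [List.nil_append] at hm
    rw [hm, pvScanB_cons]
    simp [pvOutPass]
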